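-- pv_equiv track=rewrite | github.com/alvinyee860120/AIOps-anomaly-detection | AIOps_project_practice.py | catch_cpu_timestamp
-- ===== SOURCE A (Python) =====
-- def catch_cpu_timestamp(time,metric_name,metric):
--     listname = []
--     cnt = 0
--     for i,v in enumerate(time):
--         if metric[i] == metric_name:
--             listname.append(cnt)
--             cnt += 1
--     return listname
-- ===== SOURCE B (Python) =====
-- def catch_cpu_timestamp(time, metric_name, metric):
--     # A appends 0,1,2,... once per match, so the result is exactly
--     # range of the number of matches among the first len(time) metric entries.
--     return list(range(metric[:len(time)].count(metric_name)))
-- ===== Notes on version B (the rewrite author's own statement) =====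
-- stated objective: simpler
-- what changed: A runs an explicit loop over enumerate(time) appending an incrementing counter per match; B has no loop at all: it slices metric to len(time), counts metric_name with list.count, and returns list(range(count)).
import Mathlib
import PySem

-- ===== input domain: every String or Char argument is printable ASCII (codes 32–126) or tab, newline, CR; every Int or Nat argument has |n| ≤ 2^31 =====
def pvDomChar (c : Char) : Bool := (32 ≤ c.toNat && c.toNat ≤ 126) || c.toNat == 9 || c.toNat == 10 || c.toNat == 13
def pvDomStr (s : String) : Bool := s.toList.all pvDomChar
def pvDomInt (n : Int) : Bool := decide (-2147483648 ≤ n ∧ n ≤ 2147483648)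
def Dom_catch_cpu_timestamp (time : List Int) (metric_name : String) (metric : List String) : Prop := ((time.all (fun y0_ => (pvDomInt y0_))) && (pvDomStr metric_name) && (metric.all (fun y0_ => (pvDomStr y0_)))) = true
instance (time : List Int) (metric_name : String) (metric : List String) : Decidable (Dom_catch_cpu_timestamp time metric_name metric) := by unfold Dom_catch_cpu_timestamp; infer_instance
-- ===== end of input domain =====

-- B replaces A's explicit counting loop by slice + count + range: no loop at all (objective: simpler).

-- ===== PORT A =====
-- loop state: (listname, cnt); metric[i] via pyGetD (in range under Pre_)
def catch_cpu_timestamp (time : List Int) (metric_name : String) (metric : List String) : List Int :=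
  (((PySem.List.enumerate time 0).foldl
      (fun (st : List Int × Int) iv =>
        if PySem.List.pyGetD metric iv.1 "" = metric_name then (st.1 ++ [st.2], st.2 + 1) else st)
      ([], 0))).1

-- ===== PORT B =====
-- list(range(metric[:len(time)].count(metric_name)))
def catch_cpu_timestamp_alt (time : List Int) (metric_name : String) (metric : List String) : List Int :=
  PySem.List.pyRange 0
    (PySem.List.count (PySem.List.slice metric none (some (time.length : Int))) metric_name) 1

-- ===== PRECONDITION & SPEC =====
-- Pre_ excludes exactly the inputs where Python A raises IndexError: A evaluates
-- metric[i] for every index i of time, so it raises iff len(time) > len(metric).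
def Pre_catch_cpu_timestamp (time : List Int) (metric_name : String) (metric : List String) : Prop :=
  time.length ≤ metric.length
instance (time : List Int) (metric_name : String) (metric : List String) : Decidable (Pre_catch_cpu_timestamp time metric_name metric) := by unfold Pre_catch_cpu_timestamp; infer_instance

def pvWitness_catch_cpu_timestamp : List Int × String × List String := ([10, 20, 30], "cpu", ["cpu", "mem", "cpu"])

def Spec_catch_cpu_timestamp (time : List Int) (metric_name : String) (metric : List String) (out : List Int) : Prop := out = catch_cpu_timestamp_alt time metric_name metric
instance (time : List Int) (metric_name : String) (metric : List String) (out : List Int) : Decidable (Spec_catch_cpu_timestamp time metric_name metric out) := by unfold Spec_catch_cpu_timestamp; infer_instance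

-- ===== CLAIM (what is proved, stated in full; the proofs are below) =====
def Claim_equal_catch_cpu_timestamp : Prop := ∀ (time : List Int) (metric_name : String) (metric : List String), Dom_catch_cpu_timestamp time metric_name metric → Pre_catch_cpu_timestamp time metric_name metric → Spec_catch_cpu_timestamp time metric_name metric (catch_cpu_timestamp time metric_name metric)

-- ===== LEMMAS AND PROOFS =====

-- Loop invariant for A: starting the fold from (range 0 c, c), it ends at
-- (range 0 c', c') where c' = c + the number of matching indices in e.
theorem catch_loop_invariant (metric_name : String) (metric : List String)
    (e : List (Int × Int)) (c : Int) (hc : 0 ≤ c) :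
    e.foldl
      (fun (st : List Int × Int) iv =>
        if PySem.List.pyGetD metric iv.1 "" = metric_name then (st.1 ++ [st.2], st.2 + 1) else st)
      (PySem.List.pyRange 0 c 1, c)
    = (PySem.List.pyRange 0 (c + (e.countP (fun iv => PySem.List.pyGetD metric iv.1 "" = metric_name) : Int)) 1,
       c + (e.countP (fun iv => PySem.List.pyGetD metric iv.1 "" = metric_name) : Int)) := by
  induction e generalizing c with
  | nil => simp
  | cons iv tl ih =>
    simp only [List.foldl_cons, List.countP_cons]
    by_cases h : PySem.List.pyGetD metric iv.1 "" = metric_name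
    · rw [if_pos h]
      rw [show PySem.List.pyRange 0 c 1 ++ [c] = PySem.List.pyRange 0 (c + 1) 1 from
            (PySem.List.pyRange_one_succ_right hc).symm]
      rw [ih (c + 1) (by omega)]
      simp [h]
      constructor <;> ring_nf
    · rw [if_neg h]
      rw [ih c hc]
      simp [h]

-- The matches A's loop sees are exactly the matches among the first len(time) entries of metric.
set_option maxRecDepth 4096 in
theorem count_enum_eq (metric_name : String) (metric : List String) :
    ∀ (time : List Int) (k : Nat), k + time.length ≤ metric.length →
    (PySem.List.enumerate time (k : Int)).countP
        (fun iv => PySem.List.pyGetD metric iv.1 "" = metric_name)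
      = ((metric.drop k).take time.length).count metric_name := by
  intro time
  induction time with
  | nil => intro k _; simp [PySem.List.enumerate_nil]
  | cons t ts ih =>
    intro k hk
    have hklt : k < metric.length := by simp at hk; omega
    rw [PySem.List.enumerate_cons, List.countP_cons]
    have hdrop : metric.drop k = metric[k] :: metric.drop (k + 1) :=
      List.drop_eq_getElem_cons hklt
    rw [hdrop]
    simp only [List.length_cons, List.take_succ_cons, List.count_cons]
    have hcast : (k : Int) + 1 = ((k + 1 : Nat) : Int) := by push_cast; ring
    rw [hcast, ih (k + 1) (by simp at hk ⊢; omega)]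
    have hget : PySem.List.pyGetD metric (k : Int) "" = metric[k] := by
      rw [PySem.List.pyGetD_natCast]
      exact List.getD_eq_getElem _ _ hklt
    simp only [hget, beq_iff_eq, decide_eq_true_eq]

-- ===== VERDICT (by name: the statement is the Claim_ definition above) =====
theorem catch_cpu_timestamp_spec : Claim_equal_catch_cpu_timestamp := by
  intro time metric_name metric _ hpre
  unfold Spec_catch_cpu_timestamp catch_cpu_timestamp catch_cpu_timestamp_alt
  have h := catch_loop_invariant metric_name metric (PySem.List.enumerate time 0) 0 le_rfl
  rw [show PySem.List.pyRange 0 0 1 = ([] : List Int) from by decide] at h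
  rw [h]
  have hc := count_enum_eq metric_name metric time 0 (by simpa using hpre)
  simp only [Nat.cast_zero] at hc
  rw [hc]
  rw [PySem.List.slice_to_natCast, PySem.List.count_eq]
  simp [Pre_catch_cpu_timestamp] at hpre
  simp
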